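-- pv_equiv track=rewrite | github.com/eshc123/2020ESHC_algorithm | previous/programmers/n진수게임_programmers.py | solution
-- ===== SOURCE A (Python) =====
-- def solution(n, t, m, p):
--     answer = ''
--     def alpha(n):
--         if n==10:
--             return "A"
--         elif n==11:
--             return "B"
--         elif n==12:
--             return "C"
--         elif n==13:
--             return "D"
--         elif n==14:
--             return "E"
--         elif n==15:
--             return "F"
--         else:
--             return str(n)
--     i=0
--     while len(answer)<t*m:
--         temp = i
--         c = ''
--         while temp>n-1:
--             c+=alpha(temp%n)
--             temp//=n
--         c+=alpha(temp)
--         answer += c[::-1]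
--         i+=1
--     index =0
--     temp = ''
--     while t>len(temp):
--         if (index+1)%m==p%m:
--             temp+=answer[index]
--         index+=1
--     return temp
-- ===== SOURCE B (Python) =====
-- def solution(n, t, m, p):
--     if t <= 0:
--         return ''
--
--     def char_at(pos):
--         # locate the block of d-digit numbers containing stream position pos
--         d, start, first, count = 1, 0, 0, n
--         while pos >= start + d * count:
--             start += d * count
--             first = n ** d
--             count = n ** (d + 1) - n ** d
--             d += 1
--         off = pos - start
--         num = first + off // d
--         j = off % d
--         dv = (num // n ** (d - 1 - j)) % n
--         return chr(48 + dv) if dv < 10 else chr(55 + dv)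
--
--     r = (p - 1) % m
--     return ''.join(char_at(r + k * m) for k in range(t))
-- ===== Notes on version B (the rewrite author's own statement) =====
-- stated objective: alternative
-- what changed: B never materialises the t*m-character stream nor scans it index by index: it maps each of the t needed stream positions directly to its number and digit via cumulative digit-count blocks (numbers with d digits occupy a block of d*(n^d-n^(d-1)) characters).
-- outside the precondition, e.g. on solution(17, 17, 1, 1): A returns '0123456789ABCDEF6', B returns '0123456789ABCDEFG'
import Mathlib
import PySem

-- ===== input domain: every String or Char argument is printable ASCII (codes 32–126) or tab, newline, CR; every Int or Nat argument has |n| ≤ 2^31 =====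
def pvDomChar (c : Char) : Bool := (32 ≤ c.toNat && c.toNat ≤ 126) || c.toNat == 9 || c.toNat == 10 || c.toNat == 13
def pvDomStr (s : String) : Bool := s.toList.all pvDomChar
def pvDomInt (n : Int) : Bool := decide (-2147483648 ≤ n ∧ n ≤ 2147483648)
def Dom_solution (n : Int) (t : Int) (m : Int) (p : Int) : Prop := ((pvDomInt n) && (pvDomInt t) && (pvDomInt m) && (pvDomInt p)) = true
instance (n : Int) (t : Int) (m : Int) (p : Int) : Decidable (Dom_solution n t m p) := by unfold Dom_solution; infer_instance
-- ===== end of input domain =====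

-- B replaces A's build-the-whole-stream-then-scan-every-index algorithm by a direct arithmetic
-- map from each needed stream position to its number/digit via cumulative digit-count blocks.

-- ===== PORT A =====
-- alpha(n): digit value to string
def alphaA (k : Int) : List Char :=
  if k = 10 then ['A'] else if k = 11 then ['B'] else if k = 12 then ['C']
  else if k = 13 then ['D'] else if k = 14 then ['E'] else if k = 15 then ['F']
  else (PySem.Int.toStr k).toList

-- inner 'while temp > n-1' loop; fuel makes it total (temp.toNat+1 iterations suffice when n ≥ 2)
def innerA (n : Int) : Nat → Int → List Char → List Char × Int
  | 0, temp, c => (c, temp)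
  | f+1, temp, c =>
    if temp > n - 1 then innerA n f (PySem.Int.floordiv temp n) (c ++ alphaA (PySem.Int.mod temp n))
    else (c, temp)

-- one iteration body of the first 'while': c for number i, then answer += c[::-1]
def convA (n i : Int) : List Char :=
  let r := innerA n (i.toNat + 1) i []
  (r.1 ++ alphaA r.2).reverse

-- first 'while len(answer) < t*m' loop; each iteration appends ≥ 1 char, so fuel (t*m).toNat suffices
def outerA (n tm : Int) : Nat → List Char → Int → List Char
  | 0, answer, _ => answer
  | f+1, answer, i =>
    if (answer.length : Int) < tm then outerA n tm f (answer ++ convA n i) (i + 1) else answer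

-- second 'while t > len(temp)' loop; the loop terminates within t*m iterations on admitted inputs.
-- answer[index] is PySem.List.pyGetD; its default is unreachable under Pre_ (index < t*m ≤ len answer)
def pickA (t m p : Int) (answer : List Char) : Nat → Int → List Char → List Char
  | 0, _, temp => temp
  | f+1, index, temp =>
    if (temp.length : Int) < t then
      if PySem.Int.mod (index + 1) m = PySem.Int.mod p m then
        pickA t m p answer f (index + 1) (temp ++ [PySem.List.pyGetD answer index '?'])
      else pickA t m p answer f (index + 1) temp
    else temp

def solution (n : Int) (t : Int) (m : Int) (p : Int) : String :=
  let answer := outerA n (t * m) (t * m).toNat [] 0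
  String.mk (pickA t m p answer (t * m).toNat 0 [])

-- ===== PORT B =====
-- tail of char_at after the while loop; chr(k) is ported by hand as Char.ofNat k.toNat,
-- exact for every valid code point (all digit values that occur under Pre_)
def finishB (n pos d start first : Int) : Char :=
  let off := pos - start
  let num := first + PySem.Int.floordiv off d
  let j := PySem.Int.mod off d
  let dv := PySem.Int.mod (PySem.Int.floordiv num (n ^ (d - 1 - j).toNat)) n
  if dv < 10 then Char.ofNat (48 + dv).toNat else Char.ofNat (55 + dv).toNat

-- the 'while pos >= start + d*count' loop of char_at; fuel pos.toNat+1 suffices (start grows each step)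
def charLoopB (n pos : Int) : Nat → Int → Int → Int → Int → Char
  | 0, d, start, first, _ => finishB n pos d start first
  | f+1, d, start, first, count =>
    if pos ≥ start + d * count then
      charLoopB n pos f (d + 1) (start + d * count) (n ^ d.toNat) (n ^ (d + 1).toNat - n ^ d.toNat)
    else finishB n pos d start first

def charAtB (n pos : Int) : Char := charLoopB n pos (pos.toNat + 1) 1 0 0 n

def solution_alt (n : Int) (t : Int) (m : Int) (p : Int) : String :=
  if t ≤ 0 then "" else
  let r := PySem.Int.mod (p - 1) m
  String.mk ((List.range t.toNat).map (fun (k : Nat) => charAtB n (r + (k : Int) * m)))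

-- ===== PRECONDITION & SPEC =====
-- Pre_ excludes (besides inputs where A raises or loops forever: t*m>0 with n≤1, and t≥1 with m≤0)
-- the bases n ≥ 17 when t ≥ 1: base-n digit output is unspecified there, A falls back to
-- multi-character decimal digit strings that its char-level reversal scrambles, while B renders
-- one character per digit with the standard extended alphabet — a defensible corner no one specifies.
def Pre_solution (n : Int) (t : Int) (m : Int) (p : Int) : Prop :=
  (t ≤ 0 ∧ (t * m ≤ 0 ∨ 2 ≤ n)) ∨ (1 ≤ t ∧ 1 ≤ m ∧ 2 ≤ n ∧ n ≤ 16)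
instance (n : Int) (t : Int) (m : Int) (p : Int) : Decidable (Pre_solution n t m p) := by
  unfold Pre_solution; infer_instance

def pvWitness_solution : Int × Int × Int × Int := (16, 2, 2, 1)

def Spec_solution (n : Int) (t : Int) (m : Int) (p : Int) (out : String) : Prop := out = solution_alt n t m p
instance (n : Int) (t : Int) (m : Int) (p : Int) (out : String) : Decidable (Spec_solution n t m p out) := by unfold Spec_solution; infer_instance

-- ===== CLAIM (what is proved, stated in full; the proofs are below) =====
def Claim_equal_solution : Prop := ∀ (n : Int) (t : Int) (m : Int) (p : Int), Dom_solution n t m p → Pre_solution n t m p → Spec_solution n t m p (solution n t m p)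

-- ===== LEMMAS AND PROOFS =====

-- canonical infinite stream: chunk nn i = base-nn representation of i (msb first)
def digitChar (d : Nat) : Char := if d < 10 then Char.ofNat (48 + d) else Char.ofNat (55 + d)
def lsbChunk (nn i : Nat) : List Char := if i = 0 then ['0'] else (Nat.digits nn i).map digitChar
def chunk (nn i : Nat) : List Char := (lsbChunk nn i).reverse
def blocks (nn N : Nat) : List Char := (List.range N).flatMap (chunk nn)
def streamChar (nn pos : Nat) : Char := (blocks nn (pos + 1)).getD pos '?'


theorem chunk_ne_nil (nn i : Nat) : chunk nn i ≠ [] := by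
  unfold chunk lsbChunk
  split
  · simp
  · simp [Nat.digits_ne_nil_iff_ne_zero, *]

theorem blocks_succ (nn N : Nat) : blocks nn (N + 1) = blocks nn N ++ chunk nn N := by
  simp [blocks, List.range_succ]

theorem blocks_add (nn a k : Nat) :
    blocks nn (a + k) = blocks nn a ++ (List.range' a k).flatMap (chunk nn) := by
  induction k with
  | zero => simp
  | succ k ih =>
      rw [← Nat.add_assoc, blocks_succ, ih, List.range'_1_concat]
      simp

theorem length_blocks_ge (nn N : Nat) : N ≤ (blocks nn N).length := by
  induction N with
  | zero => simp
  | succ N ih =>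
      rw [blocks_succ]
      have h := chunk_ne_nil nn N
      have : 1 ≤ (chunk nn N).length := List.length_pos_iff.mpr h
      simp only [List.length_append]; omega

theorem blocks_prefix (nn M N : Nat) (h : M ≤ N) : blocks nn M <+: blocks nn N := by
  obtain ⟨k, rfl⟩ := Nat.exists_eq_add_of_le h
  rw [blocks_add]; exact List.prefix_append _ _

theorem getD_of_prefix {l₁ l₂ : List Char} (h : l₁ <+: l₂) (pos : Nat) (hp : pos < l₁.length) :
    l₂.getD pos '?' = l₁.getD pos '?' := by
  obtain ⟨tail, rfl⟩ := h
  rw [List.getD_append _ _ _ _ hp]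

theorem blocks_getD (nn N pos : Nat) (h : pos < (blocks nn N).length) :
    (blocks nn N).getD pos '?' = streamChar nn pos := by
  unfold streamChar
  have hp : pos < (blocks nn (pos + 1)).length :=
    Nat.lt_of_lt_of_le (Nat.lt_succ_self pos) (length_blocks_ge nn (pos + 1))
  rcases Nat.le_total N (pos + 1) with hle | hle
  · rw [getD_of_prefix (blocks_prefix nn N (pos+1) hle) pos h]
  · rw [getD_of_prefix (blocks_prefix nn (pos+1) N hle) pos hp]

-- entries of Nat.digits
theorem digits_getD (nn : Nat) (h2 : 2 ≤ nn) :
    ∀ i k, k < (Nat.digits nn i).length → (Nat.digits nn i).getD k 0 = i / nn ^ k % nn := by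
  intro i
  induction i using Nat.strong_induction_on with
  | _ i ih =>
      intro k hk
      rcases Nat.eq_zero_or_pos i with rfl | hi
      · simp at hk
      · rw [Nat.digits_def' (by omega : 1 < nn) hi] at hk ⊢
        cases k with
        | zero => simp
        | succ k =>
            have hdiv : i / nn < i := Nat.div_lt_self hi (by omega)
            simp only [List.getD_cons_succ]
            rw [ih (i / nn) hdiv k (by simpa using hk)]
            rw [Nat.div_div_eq_div_mul, pow_succ']

-- single-digit numbers
theorem digits_of_lt (nn i : Nat) (h2 : 2 ≤ nn) (h0 : i ≠ 0) (hlt : i < nn) :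
    Nat.digits nn i = [i] := by
  rw [Nat.digits_def' (by omega : 1 < nn) (Nat.pos_of_ne_zero h0)]
  rw [Nat.mod_eq_of_lt hlt, Nat.div_eq_of_lt hlt]
  simp

theorem chunk_length (nn i e : Nat) (h2 : 2 ≤ nn)
    (hlo : nn ^ e ≤ i) (hhi : i < nn ^ (e + 1)) :
    (chunk nn i).length = e + 1 := by
  have h0 : i ≠ 0 := by
    have : 1 ≤ nn ^ e := Nat.one_le_pow _ _ (by omega)
    omega
  unfold chunk lsbChunk
  simp only [h0, if_false, List.length_reverse, List.length_map]
  rw [Nat.digits_len nn i (by omega) h0]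
  have : Nat.log nn i = e := Nat.log_eq_of_pow_le_of_lt_pow hlo hhi
  omega

theorem chunk_length_base (nn i : Nat) (h2 : 2 ≤ nn) (hhi : i < nn) :
    (chunk nn i).length = 1 := by
  rcases Nat.eq_zero_or_pos i with rfl | hi
  · simp [chunk, lsbChunk]
  · exact chunk_length nn i 0 h2 (by simpa using hi) (by simpa using hhi)

-- entry j of chunk i, i with e+1 digits
theorem chunk_getD (nn i e j : Nat) (h2 : 2 ≤ nn) (hlen : (chunk nn i).length = e + 1)
    (hj : j ≤ e) :
    (chunk nn i).getD j '?' = digitChar (i / nn ^ (e - j) % nn) := by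
  rcases Nat.eq_zero_or_pos i with rfl | hi
  · have he : e = 0 := by
      have : (chunk nn 0).length = 1 := by simp [chunk, lsbChunk]
      omega
    subst he
    interval_cases j
    have h00 : (0:Nat) / nn ^ (0 - 0) % nn = 0 := by simp
    rw [h00]
    simp [chunk, lsbChunk]
    decide
  · have h0 : i ≠ 0 := by omega
    unfold chunk lsbChunk at hlen ⊢
    simp only [h0, if_false] at hlen ⊢
    have hlen' : (Nat.digits nn i).length = e + 1 := by
      simpa using hlen
    have hj' : j < ((Nat.digits nn i).map digitChar).length := by simp only [List.length_map, hlen']; omega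
    rw [List.getD_eq_getElem _ _ (by simpa using hj')]
    rw [List.getElem_reverse]
    have hidx : ((Nat.digits nn i).map digitChar).length - 1 - j < (Nat.digits nn i).length := by
      simp only [List.length_map, hlen']; omega
    rw [List.getElem_map]
    have : (Nat.digits nn i)[((Nat.digits nn i).map digitChar).length - 1 - j] =
        (Nat.digits nn i).getD (((Nat.digits nn i).map digitChar).length - 1 - j) 0 := by
      rw [List.getD_eq_getElem _ _ hidx]
    rw [this, digits_getD nn h2 i _ (by simp only [List.length_map, hlen']; omega)]
    have hexp : ((List.map digitChar (Nat.digits nn i)).length - 1 - j) = e - j := by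
      simp only [List.length_map, hlen']; omega
    rw [hexp]

-- getD of a flatMap of uniform-length chunks
theorem flatMap_uniform (f : Nat → List Char) (d : Nat) :
    ∀ (count a off : Nat), (∀ i, a ≤ i → i < a + count → (f i).length = d) →
      off < count * d →
      ((List.range' a count).flatMap f).getD off '?' = (f (a + off / d)).getD (off % d) '?' := by
  intro count
  induction count with
  | zero => intro a off _ h; simp at h
  | succ c ih =>
      intro a off hlen hoff
      rw [Nat.succ_mul] at hoff
      have hd : 0 < d := by
        rcases Nat.eq_zero_or_pos d with rfl | h
        · simp at hoff
        · exact h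
      rw [List.range'_succ, List.flatMap_cons]
      have hfa : (f a).length = d := hlen a (le_refl a) (by omega)
      by_cases hcase : off < d
      · rw [List.getD_append _ _ _ _ (by omega)]
        rw [Nat.div_eq_of_lt hcase, Nat.mod_eq_of_lt hcase]
        simp
      · push_neg at hcase
        obtain ⟨off', rfl⟩ := Nat.exists_eq_add_of_le hcase
        rw [List.getD_append_right _ _ _ _ (by omega)]
        have : d + off' - (f a).length = off' := by omega
        rw [this]
        rw [ih (a+1) off' (fun i h1 h2 => hlen i (by omega) (by omega)) (by omega)]
        have h1 : (d + off') / d = off' / d + 1 := by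
          rw [Nat.add_comm d off', Nat.add_div_right _ hd]
        have h2 : (d + off') % d = off' % d := by
          rw [Nat.add_comm d off', Nat.add_mod_right]
        rw [h1, h2]
        congr 2
        omega


-- uniform-length sum for flatMap
theorem flatMap_uniform_length (f : Nat → List Char) (d : Nat) :
    ∀ (count a : Nat), (∀ i, a ≤ i → i < a + count → (f i).length = d) →
      ((List.range' a count).flatMap f).length = count * d := by
  intro count
  induction count with
  | zero => intro a _; simp
  | succ c ih =>
      intro a hlen
      rw [List.range'_succ, List.flatMap_cons, List.length_append,
        hlen a (le_refl a) (by omega), ih (a+1) (fun i h1 h2 => hlen i (by omega) (by omega))]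
      ring

-- chunk lengths on the block [first, first+count) tracked by B's loop
theorem block_chunk_len (nn e first count : Nat) (h2 : 2 ≤ nn)
    (hfc : first + count = nn ^ (e + 1))
    (hfirst0 : e = 0 → first = 0) (hfirst1 : 1 ≤ e → first = nn ^ e) :
    ∀ i, first ≤ i → i < first + count → (chunk nn i).length = e + 1 := by
  intro i h1 h2i
  rcases Nat.eq_zero_or_pos e with rfl | he
  · have h0 := hfirst0 rfl
    rw [Nat.zero_add, pow_one] at hfc
    exact chunk_length_base nn i h2 (by omega)
  · have hf := hfirst1 he
    exact chunk_length nn i e h2 (by omega) (by omega)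

theorem blocks_block_length (nn e first count : Nat) (h2 : 2 ≤ nn)
    (hfc : first + count = nn ^ (e + 1))
    (hfirst0 : e = 0 → first = 0) (hfirst1 : 1 ≤ e → first = nn ^ e) :
    (blocks nn (first + count)).length = (blocks nn first).length + count * (e + 1) := by
  rw [blocks_add, List.length_append,
    flatMap_uniform_length (chunk nn) (e+1) count first
      (block_chunk_len nn e first count h2 hfc hfirst0 hfirst1)]

-- ===== A-side =====
theorem alphaA_digit (k : Int) (h0 : 0 ≤ k) (h15 : k ≤ 15) :
    alphaA k = [digitChar k.toNat] := by
  interval_cases k <;> decide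

theorem innerA_full (nn : Nat) (h2 : 2 ≤ nn) (h16 : nn ≤ 16) :
    ∀ (i : Nat), ∀ fuel, i < fuel → ∀ c,
      (innerA (nn : Int) fuel (i : Int) c).1 ++ alphaA (innerA (nn : Int) fuel (i : Int) c).2 =
        c ++ lsbChunk nn i := by
  intro i
  induction i using Nat.strong_induction_on with
  | _ i ih =>
    intro fuel hfuel c
    cases fuel with
    | zero => omega
    | succ f =>
      by_cases hbig : nn ≤ i
      · have hcond : ((i : Nat) : Int) > (nn : Int) - 1 := by push_cast; omega
        simp only [innerA, if_pos hcond]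
        rw [PySem.Int.floordiv_natCast i nn, PySem.Int.mod_natCast i nn]
        have hdiv : i / nn < i := Nat.div_lt_self (by omega) (by omega)
        rw [ih (i / nn) hdiv f (by omega) (c ++ alphaA ((i % nn : Nat) : Int))]
        have hmlt : i % nn < nn := Nat.mod_lt _ (by omega)
        rw [alphaA_digit _ (by positivity) (by push_cast; omega), Int.toNat_natCast]
        have hi0 : i ≠ 0 := by omega
        have hq0 : i / nn ≠ 0 := by
          have := Nat.div_pos hbig (by omega : 0 < nn); omega
        unfold lsbChunk
        simp only [hi0, hq0, if_false]
        rw [Nat.digits_def' (by omega : 1 < nn) (by omega : 0 < i)]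
        simp [List.append_assoc]
      · have hcond : ¬ (((i : Nat) : Int) > (nn : Int) - 1) := by push_cast; omega
        simp only [innerA, if_neg hcond]
        rw [alphaA_digit _ (by positivity) (by push_cast; omega), Int.toNat_natCast]
        by_cases hi0 : i = 0
        · subst hi0
          have h1 : digitChar 0 = '0' := by decide
          simp [lsbChunk, h1]
        · unfold lsbChunk
          simp only [hi0, if_false]
          rw [digits_of_lt nn i h2 hi0 (by omega)]
          simp

theorem convA_chunk (nn : Nat) (h2 : 2 ≤ nn) (h16 : nn ≤ 16) (i : Nat) :
    convA (nn : Int) (i : Int) = chunk nn i := by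
  show ((innerA (nn : Int) (((i : Nat) : Int).toNat + 1) (i : Int) []).1 ++
      alphaA (innerA (nn : Int) (((i : Nat) : Int).toNat + 1) (i : Int) []).2).reverse = chunk nn i
  rw [Int.toNat_natCast, innerA_full nn h2 h16 i (i + 1) (by omega) []]
  simp [chunk]

theorem outerA_blocks (nn : Nat) (h2 : 2 ≤ nn) (h16 : nn ≤ 16) (tm : Int) :
    ∀ (fuel : Nat) (i : Nat), tm ≤ ((blocks nn i).length : Int) + (fuel : Int) →
      ∃ N, outerA (nn : Int) tm fuel (blocks nn i) (i : Int) = blocks nn N ∧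
        tm ≤ ((blocks nn N).length : Int) := by
  intro fuel
  induction fuel with
  | zero =>
      intro i hle
      exact ⟨i, rfl, by simpa using hle⟩
  | succ f ih =>
      intro i hle
      by_cases hcase : ((blocks nn i).length : Int) < tm
      · simp only [outerA, if_pos hcase]
        rw [convA_chunk nn h2 h16 i, ← blocks_succ]
        have hcast : (i : Int) + 1 = ((i + 1 : Nat) : Int) := by push_cast; ring
        rw [hcast]
        apply ih (i + 1)
        have hlt : (blocks nn i).length < (blocks nn (i + 1)).length := by
          rw [blocks_succ, List.length_append]
          have := List.length_pos_iff.mpr (chunk_ne_nil nn i)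
          omega
        push_cast at hle ⊢
        omega
      · simp only [outerA, if_neg hcase]
        exact ⟨i, rfl, by omega⟩

theorem pickA_go (nn : Nat) (t m p : Int) (answer : List Char)
    (ht : 1 ≤ t) (hm : 0 < m)
    (hlen : t * m ≤ (answer.length : Int))
    (hans : ∀ pos : Nat, pos < answer.length → answer.getD pos '?' = streamChar nn pos)
    (r : Int) (hr : r = PySem.Int.mod (p - 1) m) :
    ∀ fuel (c : Nat) (idx : Int) (temp : List Char),
      temp.length = c → (c : Int) ≤ t →
      r + ((c : Int) - 1) * m < idx → idx ≤ r + (c : Int) * m → 0 ≤ idx →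
      (r + (t - 1) * m + 1 - idx).toNat ≤ fuel →
      pickA t m p answer fuel idx temp =
        temp ++ (List.range' c (t.toNat - c)).map
          (fun (k : Nat) => streamChar nn (r + (k : Int) * m).toNat) := by
  have hr0 : 0 ≤ r := by rw [hr]; exact PySem.Int.mod_nonneg _ hm
  have hrm : r < m := by rw [hr]; exact PySem.Int.mod_lt _ hm
  have hrpm : r % m = (p - 1) % m := by
    rw [hr, PySem.Int.mod_eq_emod_of_pos hm]
    exact Int.emod_emod_of_dvd _ dvd_rfl
  have hdr : m ∣ (r - (p - 1)) :=
    Int.dvd_of_emod_eq_zero (Int.emod_eq_emod_iff_emod_sub_eq_zero.mp hrpm)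
  intro fuel
  induction fuel with
  | zero =>
      intro c idx temp hlen_c hct hlow hhigh hidx0 hfuel
      have h1 : r + (t - 1) * m + 1 - idx ≤ 0 := by omega
      have hprod : ((c : Int) - 1) * m = (c : Int) * m - m := by ring
      have hc_t : t ≤ (c : Int) := by
        by_contra hcon
        push_neg at hcon
        have h3 : ((c : Int)) * m ≤ (t - 1) * m :=
          mul_le_mul_of_nonneg_right (by omega) (by omega)
        omega
      have hz : t.toNat - c = 0 := by omega
      rw [hz]
      simp [pickA]
  | succ f ih =>
      intro c idx temp hlen_c hct hlow hhigh hidx0 hfuel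
      by_cases hct' : (c : Int) < t
      · have hcond : ((temp.length : Int)) < t := by rw [hlen_c]; exact hct'
        simp only [pickA, if_pos hcond]
        have hprod : ((c : Int) - 1) * m = (c : Int) * m - m := by ring
        by_cases htest : PySem.Int.mod (idx + 1) m = PySem.Int.mod p m
        · -- the scan is exactly at the next target index r + c*m
          have htest' : (idx + 1) % m = p % m := by
            rw [PySem.Int.mod_eq_emod_of_pos hm, PySem.Int.mod_eq_emod_of_pos hm] at htest
            exact htest
          have hdvd1 : m ∣ (idx + 1 - p) :=
            Int.dvd_of_emod_eq_zero (Int.emod_eq_emod_iff_emod_sub_eq_zero.mp htest')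
          have hdvd : m ∣ (r + (c : Int) * m - idx) := by
            have h3 : r + (c : Int) * m - idx = (r - (p - 1)) - (idx + 1 - p) + (c : Int) * m := by
              ring
            rw [h3]
            exact dvd_add (dvd_sub hdr hdvd1) (dvd_mul_left m (c : Int))
          obtain ⟨k, hk⟩ := hdvd
          have hk0 : k = 0 := by
            rcases lt_trichotomy k 0 with hlt | h0 | hgt
            · have h4 : m * k ≤ m * (-1) := mul_le_mul_of_nonneg_left (by omega) (by omega)
              have h5 : m * (-1) = -m := by ring
              omega
            · exact h0
            · have h4 : m * 1 ≤ m * k := mul_le_mul_of_nonneg_left (by omega) (by omega)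
              have h5 : m * 1 = m := by ring
              omega
          have hidx_eq : idx = r + (c : Int) * m := by rw [hk0] at hk; omega
          rw [if_pos htest]
          have e1 : (c : Int) * m ≤ (t - 1) * m := mul_le_mul_of_nonneg_right (by omega) (by omega)
          have e2 : (t - 1) * m + m = t * m := by ring
          have hidx_lt_len : idx < (answer.length : Int) := by omega
          have hget : PySem.List.pyGetD answer idx '?' = streamChar nn idx.toNat := by
            rw [PySem.List.pyGetD_eq_getElem answer '?' hidx0 hidx_lt_len]
            rw [show answer[idx.toNat]'(by omega) = answer.getD idx.toNat '?' from
              (List.getD_eq_getElem _ _ (by omega)).symm]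
            exact hans idx.toNat (by omega)
          rw [hget]
          have hcast1 : ((c + 1 : Nat) : Int) = (c : Int) + 1 := by push_cast; ring
          have hprod2 : ((c : Int) + 1) * m = (c : Int) * m + m := by ring
          have hprod3 : ((c : Int) + 1 - 1) * m = (c : Int) * m := by ring
          have hb1 : ((c + 1 : Nat) : Int) ≤ t := by rw [hcast1]; omega
          have hb2 : r + (((c + 1 : Nat) : Int) - 1) * m < idx + 1 := by rw [hcast1]; omega
          have hb3 : idx + 1 ≤ r + ((c + 1 : Nat) : Int) * m := by rw [hcast1]; omega
          rw [ih (c + 1) (idx + 1) (temp ++ [streamChar nn idx.toNat])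
            (by simp [hlen_c]) hb1 hb2 hb3 (by omega) (by omega)]
          have hsplit : t.toNat - c = (t.toNat - (c + 1)) + 1 := by omega
          rw [hsplit, List.range'_succ, List.map_cons]
          simp [hidx_eq]
        · have hne : idx ≠ r + (c : Int) * m := by
            intro heq
            apply htest
            rw [PySem.Int.mod_eq_emod_of_pos hm, PySem.Int.mod_eq_emod_of_pos hm]
            apply Int.emod_eq_emod_iff_emod_sub_eq_zero.mpr
            apply Int.emod_eq_zero_of_dvd
            have h3 : idx + 1 - p = (r - (p - 1)) + (c : Int) * m := by rw [heq]; ring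
            rw [h3]
            exact dvd_add hdr (dvd_mul_left m (c : Int))
          rw [if_neg htest]
          exact ih c (idx + 1) temp hlen_c hct (by omega) (by omega) (by omega) (by omega)
      · have hcond : ¬ ((temp.length : Int) < t) := by rw [hlen_c]; exact hct'
        simp only [pickA, if_neg hcond]
        have hz : t.toNat - c = 0 := by omega
        simp [hz]

-- ===== B-side =====
theorem chr_digit (v : Nat) :
    (if ((v : Nat) : Int) < 10 then Char.ofNat (48 + ((v : Nat) : Int)).toNat
     else Char.ofNat (55 + ((v : Nat) : Int)).toNat) = digitChar v := by
  unfold digitChar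
  by_cases h : v < 10
  · rw [show (48 + ((v : Nat) : Int)).toNat = 48 + v from by omega,
      if_pos (by exact_mod_cast h), if_pos h]
  · rw [show (55 + ((v : Nat) : Int)).toNat = 55 + v from by omega,
      if_neg (by exact_mod_cast h), if_neg h]

theorem finishB_eq (nn : Nat) (h2 : 2 ≤ nn) (h16 : nn ≤ 16) (pos start first e count : Nat)
    (hstart : start = (blocks nn first).length)
    (hfc : first + count = nn ^ (e + 1))
    (hfirst0 : e = 0 → first = 0) (hfirst1 : 1 ≤ e → first = nn ^ e)
    (hlo : start ≤ pos) (hhi : pos < start + count * (e + 1)) :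
    finishB (nn : Int) (pos : Int) ((e : Int) + 1) (start : Int) (first : Int) = streamChar nn pos := by
  have hd : 0 < e + 1 := Nat.succ_pos e
  simp only [finishB]
  have hoff_int : (pos : Int) - (start : Int) = ((pos - start : Nat) : Int) := by push_cast; omega
  rw [hoff_int]
  set offN := pos - start with hoffN
  have hjlt : offN % (e + 1) < e + 1 := Nat.mod_lt _ hd
  have hdivlt : offN / (e + 1) < count := by
    rw [Nat.div_lt_iff_lt_mul hd]; omega
  have hcaste : ((e : Int) + 1) = ((e + 1 : Nat) : Int) := by push_cast; ring
  rw [hcaste, PySem.Int.floordiv_natCast offN (e + 1), PySem.Int.mod_natCast offN (e + 1)]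
  set jN := offN % (e + 1) with hjN
  have hnum_int : (first : Int) + ((offN / (e + 1) : Nat) : Int) =
      ((first + offN / (e + 1) : Nat) : Int) := by push_cast; ring
  rw [hnum_int]
  set numN := first + offN / (e + 1) with hnumN
  have hexp : (((e + 1 : Nat) : Int) - 1 - ((jN : Nat) : Int)).toNat = e - jN := by omega
  rw [hexp]
  have hpow : ((nn : Int) ^ (e - jN)) = ((nn ^ (e - jN) : Nat) : Int) := by push_cast; ring
  rw [hpow, PySem.Int.floordiv_natCast numN (nn ^ (e - jN)),
    PySem.Int.mod_natCast (numN / nn ^ (e - jN)) nn]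
  rw [chr_digit (numN / nn ^ (e - jN) % nn)]
  -- stream side
  have hlenchunk := block_chunk_len nn e first count h2 hfc hfirst0 hfirst1
  have hblen : (blocks nn (first + count)).length = (blocks nn first).length + count * (e + 1) :=
    blocks_block_length nn e first count h2 hfc hfirst0 hfirst1
  have hposlt : pos < (blocks nn (first + count)).length := by omega
  rw [← blocks_getD nn (first + count) pos hposlt, blocks_add,
    List.getD_append_right _ _ _ _ (by omega : (blocks nn first).length ≤ pos)]
  rw [show pos - (blocks nn first).length = offN from by omega]
  rw [flatMap_uniform (chunk nn) (e + 1) count first offN hlenchunk (by omega : offN < count * (e + 1))]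
  have hg1 : first ≤ numN := Nat.le_add_right _ _
  have hg2 : numN < first + count := by omega
  have hg3 : jN ≤ e := by omega
  rw [chunk_getD nn numN e jN h2 (hlenchunk numN hg1 hg2) hg3]

theorem charLoop_eq (nn : Nat) (h2 : 2 ≤ nn) (h16 : nn ≤ 16) (pos : Nat) :
    ∀ fuel (e start first count : Nat),
      start = (blocks nn first).length →
      first + count = nn ^ (e + 1) →
      (e = 0 → first = 0) → (1 ≤ e → first = nn ^ e) →
      start ≤ pos → pos + 1 - start ≤ fuel →
      charLoopB (nn : Int) (pos : Int) fuel ((e : Int) + 1) (start : Int) (first : Int) (count : Int) =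
        streamChar nn pos := by
  intro fuel
  induction fuel with
  | zero => intro e start first count _ _ _ _ hlo hfuel; omega
  | succ f ih =>
      intro e start first count hstart hfc hf0 hf1 hlo hfuel
      have c3 : (start : Int) + ((e : Int) + 1) * (count : Int) =
          ((start + count * (e + 1) : Nat) : Int) := by push_cast; ring
      simp only [charLoopB]
      by_cases hcase : start + count * (e + 1) ≤ pos
      · rw [if_pos (by rw [ge_iff_le, c3]; exact_mod_cast hcase)]
        have hcount : 1 ≤ count := by
          rcases Nat.eq_zero_or_pos e with rfl | he
          · have h0 := hf0 rfl
            rw [h0, Nat.zero_add, Nat.zero_add, pow_one] at hfc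
            omega
          · have hff := hf1 he
            have hlt : nn ^ e < nn ^ (e + 1) := Nat.pow_lt_pow_right (by omega) (by omega)
            omega
        have hple : nn ^ (e + 1) ≤ nn ^ (e + 2) := Nat.pow_le_pow_right (by omega) (by omega)
        have hd_toNat : ((e : Int) + 1).toNat = e + 1 := by omega
        have c1 : (nn : Int) ^ ((e : Int) + 1).toNat = ((nn ^ (e + 1) : Nat) : Int) := by
          rw [hd_toNat]; push_cast; ring
        have c2 : (nn : Int) ^ ((e : Int) + 1 + 1).toNat = ((nn ^ (e + 2) : Nat) : Int) := by
          rw [show ((e : Int) + 1 + 1).toNat = e + 2 from by omega]; push_cast; ring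
        have c5 : ((nn ^ (e + 2) : Nat) : Int) - ((nn ^ (e + 1) : Nat) : Int) =
            ((nn ^ (e + 2) - nn ^ (e + 1) : Nat) : Int) := by omega
        have c4 : (e : Int) + 1 + 1 = ((e + 1 : Nat) : Int) + 1 := by push_cast; ring
        rw [c1, c2, c5, c3, c4]
        apply ih (e + 1) (start + count * (e + 1)) (nn ^ (e + 1)) (nn ^ (e + 2) - nn ^ (e + 1))
        · rw [← hfc, blocks_block_length nn e first count h2 hfc hf0 hf1]; omega
        · have : e + 1 + 1 = e + 2 := rfl
          rw [this]; omega
        · intro hcontra; omega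
        · intro _; rfl
        · exact hcase
        · have hpos : 0 < count * (e + 1) := Nat.mul_pos hcount (Nat.succ_pos e)
          omega
      · rw [if_neg (by rw [ge_iff_le, c3]; intro hcon; exact hcase (by exact_mod_cast hcon))]
        exact finishB_eq nn h2 h16 pos start first e count hstart hfc hf0 hf1 hlo (by omega)

theorem charAtB_eq (nn : Nat) (h2 : 2 ≤ nn) (h16 : nn ≤ 16) (pos : Nat) :
    charAtB (nn : Int) (pos : Int) = streamChar nn pos := by
  have h := charLoop_eq nn h2 h16 pos (pos + 1) 0 0 0 nn
    (by simp [blocks]) (by simp) (fun _ => rfl) (fun hcon => absurd hcon (by omega))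
    (Nat.zero_le _) (by omega)
  simp only [Nat.cast_zero, zero_add] at h
  simpa [charAtB, Int.toNat_natCast] using h

-- ===== VERDICT (by name: the statement is the Claim_ definition above) =====
theorem solution_spec : Claim_equal_solution := by
  intro n t m p _ hpre
  unfold Spec_solution
  by_cases ht : t ≤ 0
  · -- both loops pick nothing: both sides are ""
    have hB : solution_alt n t m p = "" := by simp [solution_alt, ht]
    rw [hB]
    show String.mk (pickA t m p (outerA n (t * m) (t * m).toNat [] 0) (t * m).toNat 0 []) = ""
    cases hfe : (t * m).toNat with
    | zero => rfl
    | succ f =>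
        simp only [pickA]
        rw [if_neg (by simp; omega)]
        rfl
  · push_neg at ht
    have hpre' : 1 ≤ t ∧ 1 ≤ m ∧ 2 ≤ n ∧ n ≤ 16 := by
      rcases hpre with h | h
      · exact absurd h.1 (by omega)
      · exact h
    obtain ⟨ht1, hm1, hn2, hn16⟩ := hpre'
    have hncast : ((n.toNat : Nat) : Int) = n := Int.toNat_of_nonneg (by omega)
    set nn := n.toNat with hnn
    have h2 : 2 ≤ nn := by omega
    have h16 : nn ≤ 16 := by omega
    rw [← hncast]
    -- the answer string built by A is a block prefix of the stream, long enough
    obtain ⟨N, hansN, hlenN⟩ := outerA_blocks nn h2 h16 (t * m) ((t * m).toNat) 0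
      (by
        have hz : (blocks nn 0).length = 0 := by simp [blocks]
        rw [hz]; omega)
    have hanswer : outerA ((nn : Nat) : Int) (t * m) (t * m).toNat [] 0 = blocks nn N := by
      simpa using hansN
    show String.mk (pickA t m p (outerA ((nn : Nat) : Int) (t * m) (t * m).toNat [] 0)
        (t * m).toNat 0 []) = solution_alt ((nn : Nat) : Int) t m p
    rw [hanswer]
    -- the selection loop picks exactly the stream characters at positions r, r+m, …
    have hr0 : (0 : Int) ≤ PySem.Int.mod (p - 1) m := PySem.Int.mod_nonneg _ (by omega)
    have hrm : PySem.Int.mod (p - 1) m < m := PySem.Int.mod_lt _ (by omega)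
    have hpick := pickA_go nn t m p (blocks nn N) ht1 (by omega) hlenN
      (fun pos hlt => blocks_getD nn N pos hlt) (PySem.Int.mod (p - 1) m) rfl
      ((t * m).toNat) 0 0 []
      rfl (by simp; omega)
      (by
        have hp1 : (((0 : Nat) : Int) - 1) * m = -m := by simp
        rw [hp1]
        simp
        omega)
      (by simp; omega) (by omega)
      (by
        have hp2 : (t - 1) * m + m = t * m := by ring
        omega)
    rw [hpick]
    -- B's side
    have hB : solution_alt ((nn : Nat) : Int) t m p =
        String.mk ((List.range t.toNat).map
          (fun (k : Nat) => charAtB ((nn : Nat) : Int) (PySem.Int.mod (p - 1) m + (k : Int) * m))) := by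
      have hnle : ¬ t ≤ 0 := by omega
      simp [solution_alt, hnle]
    rw [hB]
    congr 1
    rw [List.range_eq_range', Nat.sub_zero, List.nil_append]
    apply List.map_congr_left
    intro k _
    have hq0 : (0 : Int) ≤ PySem.Int.mod (p - 1) m + (k : Int) * m := by
      have : (0 : Int) ≤ (k : Int) * m := mul_nonneg (by positivity) (by omega)
      omega
    rw [show PySem.Int.mod (p - 1) m + (k : Int) * m =
        (((PySem.Int.mod (p - 1) m + (k : Int) * m).toNat : Nat) : Int) from by omega]
    rw [charAtB_eq nn h2 h16]
    rw [Int.toNat_natCast]
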